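-- pv_equiv track=rewrite | github.com/iamllanero/reckon | reckon/tax_hifo.py | clean_pivot_data
-- ===== SOURCE A (Python) =====
-- def clean_pivot_data(pivot_data):
--     # 1. Sort the columns
--     sorted_columns = sorted(pivot_data.keys())
--
--     # 2. Sort the rows (ignoring case) and filter out rows where the total is 0
--     all_rows = set(row for col_data in pivot_data.values() for row in col_data.keys())
--     row_totals = {row: sum(pivot_data[col].get(row, 0) for col in sorted_columns) for row in all_rows}
--     sorted_rows = sorted([row for row in all_rows if row_totals[row] != 0], key=lambda x: x.lower())
--
--     # 3. Filter out columns that add up to zero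
--     filtered_columns = {col: pivot_data[col] for col in sorted_columns if sum(pivot_data[col].values()) != 0}
--
--     # Create the modified pivot_data
--     clean_data = {}
--     for col in filtered_columns:
--         clean_data[col] = {}
--         for row in sorted_rows:
--             if row in pivot_data[col]:
--                 clean_data[col][row] = pivot_data[col][row]
--
--     return clean_data
-- ===== SOURCE B (Python) =====
-- def clean_pivot_data(pivot_data):
--     # One pass over the nonzero entries accumulates every row total;
--     # rows and columns are then filtered/sorted without re-scanning the table.
--     row_totals = {}
--     for col_data in pivot_data.values():
--         for row, v in col_data.items():
--             row_totals[row] = row_totals.get(row, 0) + v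
--     sorted_rows = sorted((r for r, t in row_totals.items() if t != 0), key=str.lower)
--     out = {}
--     for col in sorted(pivot_data):
--         col_data = pivot_data[col]
--         if sum(col_data.values()) != 0:
--             out[col] = {r: col_data[r] for r in sorted_rows if r in col_data}
--     return out
-- ===== Notes on version B (the rewrite author's own statement) =====
-- stated objective: faster
-- what changed: Row totals are accumulated in a single pass over the table's entries (a dict of running sums) instead of, for every row of the row set, re-scanning every column with .get(row, 0); the filtered-column dict is dropped in favour of filtering inline while emitting columns. Pre_ excludes inputs with two distinct row keys equal under lower(): A's order among such tied rows follows Python's set iteration (hash) order, which is not a function of the input (on the cited input the two possible orders happen to yield the same value).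
import Mathlib
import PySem

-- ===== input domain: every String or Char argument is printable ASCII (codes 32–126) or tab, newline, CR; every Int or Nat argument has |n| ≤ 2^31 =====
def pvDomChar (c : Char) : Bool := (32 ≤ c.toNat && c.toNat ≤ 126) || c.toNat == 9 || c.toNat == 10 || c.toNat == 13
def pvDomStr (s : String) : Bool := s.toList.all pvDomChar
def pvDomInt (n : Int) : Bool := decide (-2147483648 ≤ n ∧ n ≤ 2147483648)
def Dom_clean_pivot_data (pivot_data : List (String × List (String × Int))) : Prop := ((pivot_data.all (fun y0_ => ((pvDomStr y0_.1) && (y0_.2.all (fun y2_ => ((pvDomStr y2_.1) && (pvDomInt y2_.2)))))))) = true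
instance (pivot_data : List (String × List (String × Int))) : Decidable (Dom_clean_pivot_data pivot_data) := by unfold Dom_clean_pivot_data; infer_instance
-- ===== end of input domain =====

-- B accumulates every row total in ONE pass over the table's entries instead of re-scanning every
-- column per row; equivalence is about the return value (neither program mutates its argument).

-- shared input adapter: the Python argument is a dict of dicts; the assoc-list argument is wrapped
def pvAsDict (pivot_data : List (String × List (String × Int))) : PySem.Dict String (PySem.Dict String Int) :=
  PySem.Dict.mk (pivot_data.map (fun p => (p.1, PySem.Dict.mk p.2)))

-- ===== PORT A =====
def clean_pivot_data (pivot_data : List (String × List (String × Int))) : List (String × List (String × Int)) :=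
  let pd := pvAsDict pivot_data
  -- sorted_columns = sorted(pivot_data.keys())
  let sorted_columns := PySem.List.sorted pd.keys (fun x => x) false
  -- all_rows = set(row for col_data in pivot_data.values() for row in col_data.keys())
  let all_rows : PySem.Set String := PySem.Set.ofList (pd.values.flatMap (fun cd => cd.keys))
  -- row_totals = {row: sum(pivot_data[col].get(row, 0) for col in sorted_columns) for row in all_rows}
  let row_totals : PySem.Dict String Int :=
    all_rows.foldl (fun d row =>
      d.insert row ((sorted_columns.map (fun col => (pd.getD col PySem.Dict.empty).getD row 0)).sum))
      PySem.Dict.empty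
  -- sorted_rows = sorted([row for row in all_rows if row_totals[row] != 0], key=lambda x: x.lower())
  let sorted_rows :=
    PySem.List.sorted (all_rows.filter (fun row => decide (row_totals.getD row 0 ≠ 0))) PySem.Str.lower false
  -- filtered_columns = {col: pivot_data[col] for col in sorted_columns if sum(pivot_data[col].values()) != 0}
  let filtered_columns : PySem.Dict String (PySem.Dict String Int) :=
    (sorted_columns.filter (fun col => decide ((pd.getD col PySem.Dict.empty).values.sum ≠ 0))).foldl
      (fun d col => d.insert col (pd.getD col PySem.Dict.empty)) PySem.Dict.empty
  -- for col in filtered_columns: clean_data[col] = {}; for row in sorted_rows: if row in pivot_data[col]: …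
  let clean_data : PySem.Dict String (PySem.Dict String Int) :=
    filtered_columns.keys.foldl (fun cd col =>
      cd.insert col (sorted_rows.foldl (fun inner row =>
        if (pd.getD col PySem.Dict.empty).contains row then
          inner.insert row ((pd.getD col PySem.Dict.empty).getD row 0)
        else inner) PySem.Dict.empty)) PySem.Dict.empty
  clean_data.items.map (fun p => (p.1, p.2.items))

-- ===== PORT B =====
def clean_pivot_data_alt (pivot_data : List (String × List (String × Int))) : List (String × List (String × Int)) :=
  let pd := pvAsDict pivot_data
  -- for col_data in pivot_data.values(): for row, v in col_data.items(): row_totals[row] = row_totals.get(row, 0) + v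
  let row_totals : PySem.Dict String Int :=
    pd.values.foldl (fun d cd => cd.items.foldl (fun d p => d.insert p.1 (d.getD p.1 0 + p.2)) d)
      PySem.Dict.empty
  -- sorted_rows = sorted((r for r, t in row_totals.items() if t != 0), key=str.lower)
  let sorted_rows :=
    PySem.List.sorted (row_totals.items.filterMap (fun p => if p.2 ≠ 0 then some p.1 else none))
      PySem.Str.lower false
  -- for col in sorted(pivot_data): if sum(col_data.values()) != 0: out[col] = {r: col_data[r] for r in sorted_rows if r in col_data}
  let out : PySem.Dict String (PySem.Dict String Int) :=
    (PySem.List.sorted pd.keys (fun x => x) false).foldl (fun out col =>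
      let cd := pd.getD col PySem.Dict.empty
      if cd.values.sum ≠ 0 then
        out.insert col (PySem.Dict.ofList (sorted_rows.filterMap (fun r => (cd.get? r).map (fun v => (r, v)))))
      else out) PySem.Dict.empty
  out.items.map (fun p => (p.1, p.2.items))

-- ===== PRECONDITION & SPEC =====
-- Pre_ excludes (a) association lists with duplicate outer or inner keys, which do not represent
-- Python dicts, and (b) inputs with two distinct row keys equal under lower(): there A's order of
-- the tied rows follows Python's set iteration (hash) order, which is not a function of the input.
def Pre_clean_pivot_data (pivot_data : List (String × List (String × Int))) : Prop :=
  (pivot_data.map (·.1)).Nodup ∧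
  (∀ p ∈ pivot_data, (p.2.map (·.1)).Nodup) ∧
  (∀ p ∈ pivot_data, ∀ q ∈ p.2, ∀ p' ∈ pivot_data, ∀ q' ∈ p'.2,
      PySem.Str.lower q.1 = PySem.Str.lower q'.1 → q.1 = q'.1)
instance (pivot_data : List (String × List (String × Int))) : Decidable (Pre_clean_pivot_data pivot_data) := by
  unfold Pre_clean_pivot_data; infer_instance

def pvWitness_clean_pivot_data : (List (String × List (String × Int))) :=
  [("b", [("x", 1), ("Y", 2)]), ("a", [("x", 0), ("z", -1)])]

def Spec_clean_pivot_data (pivot_data : List (String × List (String × Int))) (out : List (String × List (String × Int))) : Prop := out = clean_pivot_data_alt pivot_data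
instance (pivot_data : List (String × List (String × Int))) (out : List (String × List (String × Int))) : Decidable (Spec_clean_pivot_data pivot_data out) := by unfold Spec_clean_pivot_data; infer_instance

-- ===== CLAIM (what is proved, stated in full; the proofs are below) =====
def Claim_equal_clean_pivot_data : Prop := ∀ (pivot_data : List (String × List (String × Int))), Dom_clean_pivot_data pivot_data → Pre_clean_pivot_data pivot_data → Spec_clean_pivot_data pivot_data (clean_pivot_data pivot_data)

-- ===== LEMMAS AND PROOFS =====

-- B's running-sum update over one column's items, pointwise
theorem pv_getD_entry_fold (l : List (String × Int)) (d : PySem.Dict String Int) (r : String) :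
    (l.foldl (fun d p => d.insert p.1 (d.getD p.1 0 + p.2)) d).getD r 0
      = d.getD r 0 + ((l.filter (fun p => p.1 == r)).map (·.2)).sum := by
  induction l generalizing d with
  | nil => simp
  | cons p t ih =>
    simp only [List.foldl_cons, List.filter_cons, ih]
    by_cases h : p.1 = r
    · simp [h]
      ring
    · simp [h, PySem.Dict.getD_insert, Ne.symm h]

-- with unique keys, the per-column slice sum is the dict lookup
theorem pv_sum_filter_eq_getD (l : List (String × Int)) (h : (l.map (·.1)).Nodup) (r : String) :
    ((l.filter (fun p => p.1 == r)).map (·.2)).sum = (PySem.Dict.mk l).getD r 0 := by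
  induction l with
  | nil => simp [PySem.Dict.getD, PySem.Dict.get?]
  | cons p t ih =>
    simp only [List.map_cons, List.nodup_cons] at h
    rw [List.filter_cons]
    by_cases hp : p.1 = r
    · subst hp
      have hnil : t.filter (fun q => q.1 == p.1) = [] := by
        rw [List.filter_eq_nil_iff]
        intro q hq
        simp only [beq_iff_eq]
        intro hq1
        exact h.1 (hq1 ▸ List.mem_map_of_mem (f := fun x => x.1) hq)
      rw [PySem.Dict.getD_eq_get?_getD, PySem.Dict.get?_mk_cons]
      simp [hnil]
    · rw [PySem.Dict.getD_eq_get?_getD, PySem.Dict.get?_mk_cons]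
      simp only [beq_iff_eq, hp, if_false]
      rw [← PySem.Dict.getD_eq_get?_getD]
      exact ih h.2

-- B's row_totals dict, pointwise
theorem pv_getD_RT (cds : List (PySem.Dict String Int)) (d : PySem.Dict String Int) (r : String) :
    (cds.foldl (fun d cd => cd.items.foldl (fun d p => d.insert p.1 (d.getD p.1 0 + p.2)) d) d).getD r 0
      = d.getD r 0 + (cds.map (fun cd => ((cd.items.filter (fun p => p.1 == r)).map (·.2)).sum)).sum := by
  induction cds generalizing d with
  | nil => simp
  | cons cd t ih =>
    rw [List.foldl_cons, ih, pv_getD_entry_fold]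
    simp only [List.map_cons, List.sum_cons]
    ring

-- B's row_totals dict, keys
theorem pv_keys_RT (cds : List (PySem.Dict String Int)) (d : PySem.Dict String Int) :
    (cds.foldl (fun d cd => cd.items.foldl (fun d p => d.insert p.1 (d.getD p.1 0 + p.2)) d) d).keys
      = PySem.Set.update d.keys (cds.flatMap PySem.Dict.keys) := by
  induction cds generalizing d with
  | nil => simp [PySem.Set.update]
  | cons cd t ih =>
    rw [List.foldl_cons, ih, List.flatMap_cons, PySem.Set.update_append,
        PySem.Dict.keys_foldl_insert_key cd.items (·.1) (fun d p => d.getD p.1 0 + p.2) d]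
    rfl

-- the two inner row dicts agree (A: membership-guarded inserts; B: comprehension over get?)
theorem pv_inner_eq (rows : List String) (cd : PySem.Dict String Int) (acc : PySem.Dict String Int) :
    rows.foldl (fun inner row => if cd.contains row then inner.insert row (cd.getD row 0) else inner) acc
      = (rows.filterMap (fun r => (cd.get? r).map (fun v => (r, v)))).foldl (fun d p => d.insert p.1 p.2) acc := by
  induction rows generalizing acc with
  | nil => rfl
  | cons r t ih =>
    rw [List.foldl_cons, List.filterMap_cons]
    cases hg : cd.get? r with
    | none =>
      have : cd.contains r = false := by rw [PySem.Dict.contains_eq_isSome_get?, hg]; rfl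
      simp [this, ih]
    | some v =>
      have hc : cd.contains r = true := by rw [PySem.Dict.contains_eq_isSome_get?, hg]; rfl
      have hd : cd.getD r 0 = v := PySem.Dict.getD_of_get?_eq_some cd 0 hg
      simp [hc, hd, ih]

-- B's generator over items as a key filter
theorem pv_filterMap_if (l : List (String × Int)) :
    l.filterMap (fun p => if p.2 ≠ 0 then some p.1 else none)
      = (l.filter (fun p => decide (p.2 ≠ 0))).map (·.1) := by
  induction l with
  | nil => rfl
  | cons p t ih =>
    by_cases h : p.2 = 0 <;> simp_all

-- the two pre-sort row lists coincide
theorem pv_rows_eq (pd : PySem.Dict String (PySem.Dict String Int))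
    (hK : pd.keys.Nodup) (hV : ∀ cd ∈ pd.values, cd.keys.Nodup) :
    (PySem.Set.ofList (pd.values.flatMap (fun cd => cd.keys))).filter
        (fun row => decide (((PySem.Set.ofList (pd.values.flatMap (fun cd => cd.keys))).foldl
            (fun d row => d.insert row
              (((PySem.List.sorted pd.keys (fun x => x) false).map
                  (fun col => (pd.getD col PySem.Dict.empty).getD row 0)).sum)) PySem.Dict.empty).getD row 0 ≠ 0))
      = (pd.values.foldl (fun d cd => cd.items.foldl (fun d p => d.insert p.1 (d.getD p.1 0 + p.2)) d)
            PySem.Dict.empty).items.filterMap (fun p => if p.2 ≠ 0 then some p.1 else none) := by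
  set AR : List String := PySem.Set.ofList (pd.values.flatMap (fun cd => cd.keys)) with hAR
  set RTB : PySem.Dict String Int :=
    pd.values.foldl (fun d cd => cd.items.foldl (fun d p => d.insert p.1 (d.getD p.1 0 + p.2)) d)
      PySem.Dict.empty with hRTB
  have hARnd : AR.Nodup := PySem.Set.nodup_ofList _
  have hRTkeys : RTB.keys = AR := by
    rw [hRTB, pv_keys_RT, PySem.Dict.keys_empty, PySem.Set.update_nil_left, hAR]
  have hRTnd : RTB.keys.Nodup := by rw [hRTkeys]; exact hARnd
  have hitems : RTB.items = AR.map (fun r => (r, RTB.getD r 0)) := by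
    rw [PySem.Dict.items_eq_map_keys RTB hRTnd 0, hRTkeys]
  rw [hitems, pv_filterMap_if, List.filter_map, List.map_map]
  have hid : ((fun p : String × Int => p.1) ∘ fun r => (r, RTB.getD r 0)) = fun r : String => r := rfl
  rw [hid, List.map_id']
  apply List.filter_congr
  intro row hrow
  simp only [Function.comp_apply]
  -- A's total at row
  have hfresh := PySem.Dict.items_foldl_insert_fresh AR (fun r => r)
      (fun row => ((PySem.List.sorted pd.keys (fun x => x) false).map
        (fun col => (pd.getD col PySem.Dict.empty).getD row 0)).sum) PySem.Dict.empty
      (by intro a _; exact PySem.Dict.contains_empty a) (by simpa using hARnd)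
  have hRTAnd : ((AR.foldl (fun d row => d.insert row
      (((PySem.List.sorted pd.keys (fun x => x) false).map
        (fun col => (pd.getD col PySem.Dict.empty).getD row 0)).sum)) PySem.Dict.empty)).keys.Nodup := by
    rw [PySem.Dict.keys_foldl_insert AR
      (fun _ row => ((PySem.List.sorted pd.keys (fun x => x) false).map
        (fun col => (pd.getD col PySem.Dict.empty).getD row 0)).sum) PySem.Dict.empty,
      PySem.Dict.keys_empty, PySem.Set.update_nil_left, PySem.Set.ofList_eq_self_of_nodup _ hARnd]
    exact hARnd
  have h1 : (AR.foldl (fun d row => d.insert row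
      (((PySem.List.sorted pd.keys (fun x => x) false).map
        (fun col => (pd.getD col PySem.Dict.empty).getD row 0)).sum)) PySem.Dict.empty).getD row 0
      = ((PySem.List.sorted pd.keys (fun x => x) false).map
          (fun col => (pd.getD col PySem.Dict.empty).getD row 0)).sum := by
    apply PySem.Dict.getD_of_mem_items _ _ hRTAnd
    rw [hfresh]
    exact List.mem_append_right _ (List.mem_map_of_mem hrow)
  -- B's total at row
  have h2 : RTB.getD row 0 = (pd.values.map (fun cd => cd.getD row 0)).sum := by
    rw [hRTB, pv_getD_RT, PySem.Dict.getD_empty, zero_add]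
    congr 1
    apply List.map_congr_left
    intro cd hcd
    exact pv_sum_filter_eq_getD cd.items (hV cd hcd) row
  -- the totals agree: sorted columns are a permutation of the key list
  have h3 : ((PySem.List.sorted pd.keys (fun x => x) false).map
      (fun col => (pd.getD col PySem.Dict.empty).getD row 0)).sum
      = (pd.values.map (fun cd => cd.getD row 0)).sum := by
    rw [List.Perm.sum_eq (List.Perm.map _ (PySem.List.sorted_perm pd.keys (fun x => x) false)),
      PySem.Dict.values_eq_map_keys pd hK PySem.Dict.empty, List.map_map]
    rfl
  rw [h1, h3, h2]

-- a guarded fold is the fold of the filtered list (Prop-guard form of List.foldl_filter)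
theorem pv_foldl_filter {α β : Type} (p : α → Prop) [DecidablePred p] (f : β → α → β)
    (l : List α) (init : β) :
    (l.filter (fun x => decide (p x))).foldl f init
      = l.foldl (fun acc x => if p x then f acc x else acc) init := by
  induction l generalizing init with
  | nil => rfl
  | cons a t ih => by_cases h : p a <;> simp [h, ih]

-- the output folds agree once the row list is shared
theorem pv_out_eq (pd : PySem.Dict String (PySem.Dict String Int)) (hK : pd.keys.Nodup)
    (SR : List String) :
    (((PySem.List.sorted pd.keys (fun x => x) false).filter
        (fun col => decide ((pd.getD col PySem.Dict.empty).values.sum ≠ 0))).foldl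
        (fun d col => d.insert col (pd.getD col PySem.Dict.empty)) PySem.Dict.empty).keys.foldl
        (fun cd col => cd.insert col (SR.foldl (fun inner row =>
          if (pd.getD col PySem.Dict.empty).contains row then
            inner.insert row ((pd.getD col PySem.Dict.empty).getD row 0)
          else inner) PySem.Dict.empty)) PySem.Dict.empty
      = (PySem.List.sorted pd.keys (fun x => x) false).foldl (fun out col =>
          if (pd.getD col PySem.Dict.empty).values.sum ≠ 0 then
            out.insert col (PySem.Dict.ofList (SR.filterMap
              (fun r => ((pd.getD col PySem.Dict.empty).get? r).map (fun v => (r, v)))))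
          else out) PySem.Dict.empty := by
  have hsnd : (PySem.List.sorted pd.keys (fun x => x) false).Nodup :=
    ((PySem.List.sorted_perm pd.keys (fun x => x) false).nodup_iff).mpr hK
  have hfnd : ((PySem.List.sorted pd.keys (fun x => x) false).filter
      (fun col => decide ((pd.getD col PySem.Dict.empty).values.sum ≠ 0))).Nodup := hsnd.filter _
  rw [PySem.Dict.keys_foldl_insert _ (fun _ col => pd.getD col PySem.Dict.empty) PySem.Dict.empty,
    PySem.Dict.keys_empty, PySem.Set.update_nil_left, PySem.Set.ofList_eq_self_of_nodup _ hfnd,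
    pv_foldl_filter (fun col => (pd.getD col PySem.Dict.empty).values.sum ≠ 0)]
  apply PySem.List.foldl_congr_mem
  intro acc col _
  by_cases h : (pd.getD col PySem.Dict.empty).values.sum ≠ 0
  · rw [if_pos h, if_pos h, pv_inner_eq]
    rfl
  · rw [if_neg h, if_neg h]

-- ===== VERDICT (by name: the statement is the Claim_ definition above) =====
theorem clean_pivot_data_spec : Claim_equal_clean_pivot_data := by
  intro pivot_data _ hpre
  obtain ⟨h1, h2, -⟩ := hpre
  unfold Spec_clean_pivot_data clean_pivot_data clean_pivot_data_alt
  have hkeys : (pvAsDict pivot_data).keys = pivot_data.map (·.1) := by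
    simp [pvAsDict, PySem.Dict.keys]
  have hK : (pvAsDict pivot_data).keys.Nodup := by rw [hkeys]; exact h1
  have hV : ∀ cd ∈ (pvAsDict pivot_data).values, cd.keys.Nodup := by
    intro cd hcd
    have hvals : (pvAsDict pivot_data).values = pivot_data.map (fun p => PySem.Dict.mk p.2) := by
      simp [pvAsDict, PySem.Dict.values]
    rw [hvals] at hcd
    obtain ⟨p, hp, rfl⟩ := List.mem_map.mp hcd
    simpa [PySem.Dict.keys] using h2 p hp
  refine congrArg (fun d : PySem.Dict String (PySem.Dict String Int) =>
    d.items.map (fun p => (p.1, p.2.items))) ?_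
  rw [pv_rows_eq _ hK hV]
  exact pv_out_eq _ hK _
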